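-- pv_equiv track=rewrite | github.com/joagonzalez/ditella-tecnicas-algoritmicas | semanales/ej1.py | cant_0_aux
-- ===== SOURCE A (Python) =====
-- def cant_0_aux(L, desde):
--     if desde >= len(L):
--         return 0
--     else:
--         if L[desde] == 0:
--             return 1 + cant_0_aux(L, desde+1) # se ejecuta n-veces instrucciones de O(1)
--         else:
--             return cant_0_aux(L, desde+1) # O(1) si no encuentra entonces avanza
-- ===== SOURCE B (Python) =====
-- def cant_0_aux(L, desde):
--     count = 0
--     for i in range(desde, len(L)):
--         if L[i] == 0:
--             count += 1
--     return count
-- ===== Notes on version B (the rewrite author's own statement) =====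
-- stated objective: simpler
-- what changed: Replaces the O(n)-deep recursion with a single iterative index loop (range(desde, len(L))) accumulating a counter; same indices visited, so negative desde behaves identically.
import Mathlib
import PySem

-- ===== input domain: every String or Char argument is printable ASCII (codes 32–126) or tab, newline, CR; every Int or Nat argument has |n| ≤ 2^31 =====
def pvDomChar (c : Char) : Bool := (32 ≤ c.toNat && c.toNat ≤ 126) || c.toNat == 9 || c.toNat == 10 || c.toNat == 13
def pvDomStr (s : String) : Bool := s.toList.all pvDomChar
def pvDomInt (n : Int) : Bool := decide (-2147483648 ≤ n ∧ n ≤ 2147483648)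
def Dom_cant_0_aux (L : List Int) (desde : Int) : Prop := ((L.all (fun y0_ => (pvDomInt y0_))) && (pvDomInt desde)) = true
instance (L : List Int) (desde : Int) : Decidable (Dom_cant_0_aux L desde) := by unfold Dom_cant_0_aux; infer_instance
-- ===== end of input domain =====

-- B replaces A's O(n)-deep recursion by a single iterative counting loop over the same indices (simpler, O(1) space).


-- ===== PORT A =====
-- literal port of the recursion; the 'none' branch (IndexError on L[desde]) is excluded by Pre_
def cant_0_aux (L : List Int) (desde : Int) : Int :=
  if (L.length : Int) ≤ desde then 0
  else
    match PySem.List.pyGet? L desde with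
    | none => 0  -- Python raises IndexError here; outside Pre_
    | some v =>
      if v = 0 then 1 + cant_0_aux L (desde + 1)
      else cant_0_aux L (desde + 1)
termination_by ((L.length : Int) - desde).toNat
decreasing_by all_goals omega

-- ===== PORT B =====
-- iterative loop: for i in range(desde, len(L)): if L[i] == 0: count += 1
-- the .getD 1 default is never used inside Pre_ (the index is always in range there)
def cant_0_aux_alt (L : List Int) (desde : Int) : Int :=
  (PySem.List.pyRange desde (L.length : Int) 1).foldl
    (fun count i => if (PySem.List.pyGet? L i).getD 1 = 0 then count + 1 else count) 0

-- ===== PRECONDITION & SPEC =====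
-- Pre_ excludes exactly the inputs where A raises IndexError (desde < -len(L) with desde < len(L)).
def Pre_cant_0_aux (L : List Int) (desde : Int) : Prop :=
  (L.length : Int) ≤ desde ∨ -(L.length : Int) ≤ desde
instance (L : List Int) (desde : Int) : Decidable (Pre_cant_0_aux L desde) := by
  unfold Pre_cant_0_aux; infer_instance

def pvWitness_cant_0_aux : List Int × Int := ([0, 3, 0], 1)

def Spec_cant_0_aux (L : List Int) (desde : Int) (out : Int) : Prop := out = cant_0_aux_alt L desde
instance (L : List Int) (desde : Int) (out : Int) : Decidable (Spec_cant_0_aux L desde out) := by unfold Spec_cant_0_aux; infer_instance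

-- ===== CLAIM (what is proved, stated in full; the proofs are below) =====
def Claim_equal_cant_0_aux : Prop := ∀ (L : List Int) (desde : Int), Dom_cant_0_aux L desde → Pre_cant_0_aux L desde → Spec_cant_0_aux L desde (cant_0_aux L desde)

-- ===== LEMMAS AND PROOFS =====

-- pulling the accumulator out of B's counting fold
lemma foldl_count_out (g : Int → Prop) [DecidablePred g] (l : List Int) (c : Int) :
    l.foldl (fun count i => if g i then count + 1 else count) c
      = c + l.foldl (fun count i => if g i then count + 1 else count) 0 := by
  induction l generalizing c with
  | nil => simp
  | cons x xs ih =>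
    simp only [List.foldl_cons]
    rw [ih, ih (if g x then 0 + 1 else 0)]
    split <;> omega

lemma cant_0_main (n : Nat) : ∀ (L : List Int) (desde : Int),
    ((L.length : Int) - desde).toNat = n → Pre_cant_0_aux L desde →
    cant_0_aux L desde = cant_0_aux_alt L desde := by
  induction n with
  | zero =>
    intro L desde hn _
    have hle : (L.length : Int) ≤ desde := by omega
    rw [cant_0_aux, cant_0_aux_alt, PySem.List.pyRange_one_eq_nil hle]
    simp [hle]
  | succ k ih =>
    intro L desde hn hpre
    have hlt : desde < (L.length : Int) := by omega
    have hin : -(L.length : Int) ≤ desde := by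
      rcases hpre with h | h; omega; exact h
    obtain ⟨v, hv⟩ : ∃ v, PySem.List.pyGet? L desde = some v := by
      rcases Option.eq_none_or_eq_some (PySem.List.pyGet? L desde) with h | h
      · exfalso
        rw [PySem.List.pyGet?_eq_none_iff] at h
        exact h ⟨hin, hlt⟩
      · exact h
    have hpre' : Pre_cant_0_aux L (desde + 1) := Or.inr (by omega)
    have ihd := ih L (desde + 1) (by omega) hpre'
    rw [cant_0_aux, cant_0_aux_alt, PySem.List.pyRange_one_cons hlt]
    simp only [List.foldl_cons, hv, Option.getD_some, not_le.mpr hlt]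
    rw [foldl_count_out (fun i => (PySem.List.pyGet? L i).getD 1 = 0)]
    by_cases hz : v = 0 <;> simp [hz, ihd, cant_0_aux_alt]

-- ===== VERDICT (by name: the statement is the Claim_ definition above) =====
theorem cant_0_aux_spec : Claim_equal_cant_0_aux := by
  intro L desde _ hpre
  exact cant_0_main ((L.length : Int) - desde).toNat L desde rfl hpre
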